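-- pv_equiv track=rewrite | github.com/sonodano/AtCoder | AGC/039/A.py | count_replace
-- ===== SOURCE A (Python) =====
-- def count_replace(l):
--     ret = 0
--     cnt = 1
--     for i in range(len(l)-1):
--         if l[i] == l[i+1]: #
--             cnt += 1
--         elif l[i] != l[i+1]:
--             ret += cnt//2
--             cnt = 1
--     ret += cnt // 2 # 最後尾（ループが尽きた）のための処理. 末尾が連続していた場合には連続分が追加、それ以外は0が追加
--     return ret
-- ===== SOURCE B (Python) =====
-- def count_replace(l):
--     # Greedy adjacent pairing: whenever two neighbouring elements are equal,
--     # pair (replace) them and jump past both; count the pairs directly.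
--     # No run lengths or floor division anywhere.
--     ret = 0
--     i = 1
--     n = len(l)
--     while i < n:
--         if l[i] == l[i - 1]:
--             ret += 1
--             i += 2
--         else:
--             i += 1
--     return ret
-- ===== Notes on version B (the rewrite author's own statement) =====
-- stated objective: alternative
-- what changed: Replaced A's run-length counter with flush-and-floor-divide by a greedy adjacent-pair scan: whenever two neighbouring elements are equal the pair is counted and the index jumps past both, so no run lengths and no floor division are ever computed.
import Mathlib
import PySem

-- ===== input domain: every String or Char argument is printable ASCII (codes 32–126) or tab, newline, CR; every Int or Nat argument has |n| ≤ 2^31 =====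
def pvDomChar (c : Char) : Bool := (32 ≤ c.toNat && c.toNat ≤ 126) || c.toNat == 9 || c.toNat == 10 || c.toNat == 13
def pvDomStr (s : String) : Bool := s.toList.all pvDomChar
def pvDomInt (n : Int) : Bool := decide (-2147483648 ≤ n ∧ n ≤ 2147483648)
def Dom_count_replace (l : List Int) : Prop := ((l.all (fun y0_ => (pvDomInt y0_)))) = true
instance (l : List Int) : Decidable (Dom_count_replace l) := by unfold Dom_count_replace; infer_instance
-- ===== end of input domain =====

-- B replaces A's run-length counting (flush cnt//2 at each run boundary) with a greedy
-- adjacent-pair scan that counts a pair and skips past both elements (alternative; return value only).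

-- ===== PORT A =====
-- A's loop over i in range(len(l)-1) comparing l[i] with l[i+1], carried state (ret, cnt);
-- ported as the structural recursion over adjacent pairs with the same state and branches.
def countReplaceLoopA : List Int → Int → Int → Int × Int
  | a :: b :: rest, ret, cnt =>
      if a == b then countReplaceLoopA (b :: rest) ret (cnt + 1)
      else countReplaceLoopA (b :: rest) (ret + PySem.Int.floordiv cnt 2) 1
  | _, ret, cnt => (ret, cnt)

def count_replace (l : List Int) : Int :=
  let p := countReplaceLoopA l 0 1
  p.1 + PySem.Int.floordiv p.2 2

-- ===== PORT B =====
-- B's while loop compares l[i] with l[i-1]; on a match it counts 1 and jumps i by 2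
-- (consuming both elements), otherwise i advances by 1: ported as recursion that
-- drops two elements on a pair and one otherwise.
def pairCount : List Int → Int
  | a :: b :: rest => if a == b then 1 + pairCount rest else pairCount (b :: rest)
  | _ => 0

def count_replace_alt (l : List Int) : Int := pairCount l

-- ===== PRECONDITION & SPEC =====
def Spec_count_replace (l : List Int) (out : Int) : Prop := out = count_replace_alt l
instance (l : List Int) (out : Int) : Decidable (Spec_count_replace l out) := by unfold Spec_count_replace; infer_instance

-- ===== CLAIM (what is proved, stated in full; the proofs are below) =====
def Claim_equal_count_replace : Prop := ∀ (l : List Int), Dom_count_replace l → Spec_count_replace l (count_replace l)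

-- ===== LEMMAS AND PROOFS =====

-- Invariant: with A at head a carrying (ret, cnt) for the current run (cnt ≥ 1),
-- A's final answer is ret + cnt/2 plus B's greedy count on the rest, where the head a is
-- still available for pairing iff cnt is odd (B has paired the run's elements greedily).
theorem loopA_pairCount (t : List Int) (a ret cnt : Int) (hcnt : 1 ≤ cnt) :
    (countReplaceLoopA (a :: t) ret cnt).1
      + PySem.Int.floordiv (countReplaceLoopA (a :: t) ret cnt).2 2
      = ret + PySem.Int.floordiv cnt 2
          + (if cnt % 2 = 1 then pairCount (a :: t) else pairCount t) := by
  induction t generalizing a ret cnt with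
  | nil =>
    simp only [countReplaceLoopA, pairCount]
    split_ifs <;> ring
  | cons b t' ih =>
    by_cases h : a = b
    · subst h
      simp only [countReplaceLoopA, beq_self_eq_true, if_true]
      rw [ih a ret (cnt + 1) (by omega)]
      rw [PySem.Int.floordiv_eq_ediv_of_pos (a := cnt) (by omega),
          PySem.Int.floordiv_eq_ediv_of_pos (a := cnt + 1) (by omega)]
      rcases Int.emod_two_eq_zero_or_one cnt with hp | hp
      · have h1 : (cnt + 1) % 2 = 1 := by omega
        have h2 : (cnt + 1) / 2 = cnt / 2 := by omega
        simp only [hp, h1, h2]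
        norm_num
      · have h1 : (cnt + 1) % 2 = 0 := by omega
        have h2 : (cnt + 1) / 2 = cnt / 2 + 1 := by omega
        simp only [hp, h1, h2, pairCount, beq_self_eq_true, if_true]
        norm_num
        ring
    · have hb : (a == b) = false := by simp [h]
      simp only [countReplaceLoopA, hb, Bool.false_eq_true, if_false]
      rw [ih b (ret + PySem.Int.floordiv cnt 2) 1 le_rfl]
      have : (1 : Int) % 2 = 1 := by decide
      simp only [this, if_true, pairCount, hb, Bool.false_eq_true, if_false]
      have hf : PySem.Int.floordiv 1 2 = 0 := by decide
      rw [hf]; split_ifs <;> ring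

-- ===== VERDICT (by name: the statement is the Claim_ definition above) =====
theorem count_replace_spec : Claim_equal_count_replace := by
  intro l _
  unfold Spec_count_replace count_replace count_replace_alt
  cases l with
  | nil => decide
  | cons a t =>
    rw [loopA_pairCount t a 0 1 le_rfl]
    have hf : PySem.Int.floordiv 1 2 = 0 := by decide
    rw [hf]; simp
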